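-- pv_equiv track=rewrite | github.com/tahir24434/py-ds-algo | CodingInterviewProblems/DynamicProgramming/test.py | is_exactly_one_repeating
-- ===== SOURCE A (Python) =====
-- def is_exactly_one_repeating(l):
--     count = {}
--     for item in l:
--         count[item] = count.get(item, 0) + 1
--     repeating = False
--     for val in count.values():
--         if (not repeating) and (val > 1):
--             repeating = True
--         elif repeating and val > 1:
--             return False
--     return repeating
-- ===== SOURCE B (Python) =====
-- def is_exactly_one_repeating(l):
--     seen = set()
--     duplicates = set()
--     for x in l:
--         if x in seen:
--             duplicates.add(x)
--         else:
--             seen.add(x)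
--     return len(duplicates) == 1
-- ===== Notes on version B (the rewrite author's own statement) =====
-- stated objective: simpler
-- what changed: Replaced the count-dict build followed by a second early-return scan over the values with a single pass maintaining 'seen' and 'duplicates' sets, returning len(duplicates) == 1.
import Mathlib
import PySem

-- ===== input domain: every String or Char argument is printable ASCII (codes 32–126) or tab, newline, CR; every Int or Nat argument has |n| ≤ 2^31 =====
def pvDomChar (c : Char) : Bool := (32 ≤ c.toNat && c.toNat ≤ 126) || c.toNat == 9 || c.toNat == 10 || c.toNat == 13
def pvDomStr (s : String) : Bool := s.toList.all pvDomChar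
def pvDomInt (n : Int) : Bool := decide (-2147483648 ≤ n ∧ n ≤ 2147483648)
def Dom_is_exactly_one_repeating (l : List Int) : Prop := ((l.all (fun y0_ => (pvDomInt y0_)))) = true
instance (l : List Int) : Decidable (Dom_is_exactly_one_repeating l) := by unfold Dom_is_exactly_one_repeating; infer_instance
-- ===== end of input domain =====

-- B replaces A's count-dict build followed by an early-return scan over the values with a single
-- pass maintaining `seen`/`duplicates` sets (objective: simpler).

-- ===== PORT A =====
-- the second loop of A, with its early `return False`
def pvLoopA : List Int → Bool → Bool
  | [], rep => rep
  | v :: rest, rep =>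
    if !rep && 1 < v then pvLoopA rest true
    else if rep && 1 < v then false
    else pvLoopA rest rep

def is_exactly_one_repeating (l : List Int) : Bool :=
  pvLoopA
    (l.foldl (fun d item => d.insert item (d.getD item 0 + 1))
      (PySem.Dict.empty : PySem.Dict Int Int)).values
    false

-- ===== PORT B =====
def is_exactly_one_repeating_alt (l : List Int) : Bool :=
  decide (PySem.Set.len
    (l.foldl
      (fun (st : PySem.Set Int × PySem.Set Int) x =>
        if PySem.Set.contains st.1 x then (st.1, PySem.Set.add st.2 x)
        else (PySem.Set.add st.1 x, st.2))
      (PySem.Set.empty, PySem.Set.empty)).2 = 1)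

-- ===== PRECONDITION & SPEC =====
def Spec_is_exactly_one_repeating (l : List Int) (out : Bool) : Prop := out = is_exactly_one_repeating_alt l
instance (l : List Int) (out : Bool) : Decidable (Spec_is_exactly_one_repeating l out) := by unfold Spec_is_exactly_one_repeating; infer_instance

-- ===== CLAIM (what is proved, stated in full; the proofs are below) =====
def Claim_equal_is_exactly_one_repeating : Prop := ∀ (l : List Int), Dom_is_exactly_one_repeating l → Spec_is_exactly_one_repeating l (is_exactly_one_repeating l)

-- ===== LEMMAS AND PROOFS =====

-- A's value loop decides whether exactly one value exceeds 1
theorem pvLoopA_eq (vals : List Int) (rep : Bool) :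
    pvLoopA vals rep = decide (vals.countP (fun v => decide (1 < v)) + (if rep then 1 else 0) = 1) := by
  induction vals generalizing rep with
  | nil => cases rep <;> simp [pvLoopA]
  | cons v rest ih =>
    by_cases h : (1:Int) < v <;> cases rep <;>
      simp [pvLoopA, h, ih]

-- B's loop invariant: `seen` is the set of prefix elements, `duplicates` the distinct repeats of the prefix
theorem pvInvB (l p : List Int) (d : PySem.Set Int)
    (hd : d.Nodup) (hmem : ∀ x, x ∈ d ↔ 2 ≤ p.count x) :
    (l.foldl
      (fun (st : PySem.Set Int × PySem.Set Int) x =>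
        if PySem.Set.contains st.1 x then (st.1, PySem.Set.add st.2 x)
        else (PySem.Set.add st.1 x, st.2))
      (PySem.Set.ofList p, d)).2.Nodup ∧
    ∀ x, x ∈ (l.foldl
      (fun (st : PySem.Set Int × PySem.Set Int) x =>
        if PySem.Set.contains st.1 x then (st.1, PySem.Set.add st.2 x)
        else (PySem.Set.add st.1 x, st.2))
      (PySem.Set.ofList p, d)).2 ↔ 2 ≤ (p ++ l).count x := by
  induction l generalizing p d with
  | nil => simpa using ⟨hd, hmem⟩
  | cons x rest ih =>
    simp only [List.foldl_cons]
    have hof : PySem.Set.ofList (p ++ [x]) = PySem.Set.add (PySem.Set.ofList p) x := by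
      simp [PySem.Set.ofList_eq_foldl, List.foldl_append]
    by_cases hx : x ∈ p
    · have hc : PySem.Set.contains (PySem.Set.ofList p) x = true :=
        (PySem.Set.contains_iff _ _).mpr ((PySem.Set.mem_ofList p x).mpr hx)
      rw [if_pos hc]
      have hof' : PySem.Set.ofList (p ++ [x]) = PySem.Set.ofList p := by
        rw [hof, PySem.Set.add, if_pos hc]
      have hmem' : ∀ y, y ∈ PySem.Set.add d x ↔ 2 ≤ (p ++ [x]).count y := by
        intro y
        rw [PySem.Set.mem_add]
        rcases eq_or_ne y x with rfl | hne
        · have : 1 ≤ p.count y := List.one_le_count_iff.mpr hx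
          simp [List.count_append]; omega
        · have hcy : List.count y (p ++ [x]) = List.count y p := by
            have h0 : List.count y [x] = 0 := List.count_eq_zero.mpr (by simp [hne])
            simp [List.count_append, h0]
          rw [hcy, hmem y]
          simp [hne]
      have := ih (p ++ [x]) (PySem.Set.add d x) (PySem.Set.nodup_add d x hd) hmem'
      rw [hof'] at this
      simpa [List.append_assoc] using this
    · have hc : PySem.Set.contains (PySem.Set.ofList p) x = false := by
        simp only [Bool.eq_false_iff, Ne, PySem.Set.contains_iff, PySem.Set.mem_ofList]
        exact fun h => hx h
      rw [if_neg (by rw [hc]; exact Bool.false_ne_true)]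
      have hmem' : ∀ y, y ∈ d ↔ 2 ≤ (p ++ [x]).count y := by
        intro y
        rcases eq_or_ne y x with rfl | hne
        · have : p.count y = 0 := List.count_eq_zero.mpr hx
          simp [List.count_append, this, hmem y]
        · have hcy : List.count y (p ++ [x]) = List.count y p := by
            have h0 : List.count y [x] = 0 := List.count_eq_zero.mpr (by simp [hne])
            simp [List.count_append, h0]
          rw [hcy]
          exact hmem y
      have := ih (p ++ [x]) d hd hmem'
      rw [hof] at this
      simpa [List.append_assoc] using this

-- ===== VERDICT (by name: the statement is the Claim_ definition above) =====
theorem is_exactly_one_repeating_spec : Claim_equal_is_exactly_one_repeating := by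
  intro l _
  unfold Spec_is_exactly_one_repeating is_exactly_one_repeating is_exactly_one_repeating_alt
  -- A side: the dict loop is Counter(l); its values are the counts of the distinct elements
  rw [PySem.Dict.foldl_insert_getD_add_one_eq_counter]
  have hvals : (PySem.Dict.counter l).values
      = (PySem.Set.ofList l).map (fun k => (l.count k : Int)) := by
    simp [PySem.Dict.values, PySem.Dict.items_counter, List.map_map, Function.comp]
  rw [hvals, pvLoopA_eq]
  -- B side: the invariant at the empty prefix
  have hB := pvInvB l [] PySem.Set.empty List.nodup_nil (by simp [PySem.Set.empty])
  rw [show PySem.Set.ofList ([] : List Int) = PySem.Set.empty from rfl] at hB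
  simp only [List.nil_append] at hB
  obtain ⟨hnd, hmem⟩ := hB
  set d := (l.foldl
      (fun (st : PySem.Set Int × PySem.Set Int) x =>
        if PySem.Set.contains st.1 x then (st.1, PySem.Set.add st.2 x)
        else (PySem.Set.add st.1 x, st.2))
      (PySem.Set.empty, PySem.Set.empty)).2 with hdd
  -- both sides count the distinct elements occurring at least twice
  have hcount : ((PySem.Set.ofList l).map (fun k => (l.count k : Int))).countP
      (fun v => decide (1 < v)) = d.length := by
    rw [List.countP_map]
    have hfilter : (PySem.Set.ofList l).countP ((fun v => decide (1 < v)) ∘ (fun k => (l.count k : Int)))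
        = ((PySem.Set.ofList l).filter (fun k => decide (2 ≤ l.count k))).length := by
      rw [List.countP_eq_length_filter]
      congr 1
      apply List.filter_congr
      intro x _
      simp [Function.comp]; omega
    rw [hfilter]
    have hperm : ((PySem.Set.ofList l).filter (fun k => decide (2 ≤ l.count k))).Perm d := by
      rw [List.perm_ext_iff_of_nodup ((PySem.Set.nodup_ofList l).filter _) hnd]
      intro a
      simp only [List.mem_filter, PySem.Set.mem_ofList, hmem, decide_eq_true_eq]
      constructor
      · rintro ⟨_, h⟩; exact h
      · intro h; exact ⟨List.one_le_count_iff.mp (by omega), h⟩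
    exact hperm.length_eq
  rw [hcount]
  simp [PySem.Set.len]
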